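-- pv_equiv track=rewrite | github.com/piotrgradzinski/python_20220326 | functions_pgg/zad_3.py | wiecej_niz
-- ===== SOURCE A (Python) =====
-- def wiecej_niz(napis: str, ile_znakow: int = 1) -> set:
--     wystapienia = {}
--     for litera in napis.lower():
--         if litera not in wystapienia:
--             wystapienia[litera] = 1
--         else:
--             wystapienia[litera] += 1
--
--     wynik = set()
--     for litera, liczba_wystapien in wystapienia.items():
--         if liczba_wystapien > ile_znakow:
--             wynik.add(litera)
--
--     return wynik
-- ===== SOURCE B (Python) =====
-- def wiecej_niz(napis: str, ile_znakow: int = 1) -> set: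
--     # Partition-based tally: repeatedly take the first remaining character,
--     # strip ALL of its occurrences in one list comprehension, and read its
--     # multiplicity off the length drop -- no frequency dict is ever built.
--     chars = list(napis.lower())
--     wynik = set()
--     while chars:
--         c = chars[0]
--         rest = [x for x in chars if x != c]
--         if len(chars) - len(rest) > ile_znakow:
--             wynik.add(c)
--         chars = rest
--     return wynik
-- ===== Notes on version B (the rewrite author's own statement) =====
-- stated objective: alternative
-- what changed: Replaces the hash-table frequency count with a partition loop: repeatedly strip every occurrence of the first remaining character and read its multiplicity off the length drop, so no dict (and no second pass over items) exists.
import Mathlib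
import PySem

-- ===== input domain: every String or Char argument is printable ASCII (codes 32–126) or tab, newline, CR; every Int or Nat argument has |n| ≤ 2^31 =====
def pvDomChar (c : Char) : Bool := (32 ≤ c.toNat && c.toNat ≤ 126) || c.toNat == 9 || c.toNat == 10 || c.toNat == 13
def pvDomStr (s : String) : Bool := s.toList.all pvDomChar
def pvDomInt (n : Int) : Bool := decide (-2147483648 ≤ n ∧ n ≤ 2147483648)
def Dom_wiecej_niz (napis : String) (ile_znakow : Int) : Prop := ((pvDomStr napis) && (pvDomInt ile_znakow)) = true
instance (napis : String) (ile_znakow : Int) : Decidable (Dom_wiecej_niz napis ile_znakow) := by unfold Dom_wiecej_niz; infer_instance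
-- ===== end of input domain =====

-- B replaces A's dict frequency table by a partition loop that strips all occurrences of the first remaining character and reads its count off the length drop; alternative decomposition, no speed claim.


-- ===== PORT A =====
-- iteration over the Python string yields its characters; the 1-char strings of the
-- Python result set are formed when a character is added to wynik
def wiecej_niz (napis : String) (ile_znakow : Int) : List String :=
  let wystapienia : PySem.Dict Char Int :=
    (PySem.Str.lower napis).toList.foldl
      (fun d litera =>
        if d.contains litera = false then d.insert litera 1
        else d.insert litera (d.getD litera 0 + 1))
      PySem.Dict.empty
  wystapienia.items.foldl
    (fun (wynik : PySem.Set String) kv =>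
      if kv.2 > ile_znakow then PySem.Set.add wynik (String.ofList [kv.1]) else wynik)
    PySem.Set.empty

-- ===== PORT B =====
-- B's while loop: each iteration takes the first remaining character c, removes every
-- occurrence of c ([x for x in chars if x != c]), and adds c when the length drop
-- exceeds the threshold; structural recursion on the shrinking remainder.
def wiecejNizGo (k : Int) (chars : List Char) (wynik : PySem.Set String) : List String :=
  match chars with
  | [] => wynik
  | c :: t =>
    let rest := (c :: t).filter (fun x => x != c)
    wiecejNizGo k rest
      (if ((c :: t).length : Int) - (rest.length : Int) > k
       then PySem.Set.add wynik (String.ofList [c]) else wynik)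
termination_by chars.length
decreasing_by
  simp only [List.filter_cons, bne_self_eq_false, List.length_cons]
  exact Nat.lt_succ_of_le (List.length_filter_le _ _)

def wiecej_niz_alt (napis : String) (ile_znakow : Int) : List String :=
  wiecejNizGo ile_znakow (PySem.Str.lower napis).toList PySem.Set.empty

-- ===== PRECONDITION & SPEC =====
def Spec_wiecej_niz (napis : String) (ile_znakow : Int) (out : List String) : Prop := out = wiecej_niz_alt napis ile_znakow
instance (napis : String) (ile_znakow : Int) (out : List String) : Decidable (Spec_wiecej_niz napis ile_znakow out) := by unfold Spec_wiecej_niz; infer_instance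

-- ===== CLAIM (what is proved, stated in full; the proofs are below) =====
def Claim_equal_wiecej_niz : Prop := ∀ (napis : String) (ile_znakow : Int), Dom_wiecej_niz napis ile_znakow → Spec_wiecej_niz napis ile_znakow (wiecej_niz napis ile_znakow)

-- ===== LEMMAS AND PROOFS =====

-- the character → 1-char-string embedding is injective
lemma mkOne_inj : Function.Injective (fun c : Char => String.ofList [c]) := by
  intro a b h
  have h2 : (String.ofList [a]).toList = (String.ofList [b]).toList := by
    simpa using congrArg String.toList h
  simpa using h2

-- A's counting loop body is the canonical counter step
lemma dictA_eq_counter (l : List Char) :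
    l.foldl
      (fun d litera =>
        if d.contains litera = false then d.insert litera 1
        else d.insert litera (d.getD litera 0 + 1))
      PySem.Dict.empty = PySem.Dict.counter l := by
  rw [← PySem.Dict.foldl_insert_getD_add_one_eq_counter]
  congr 1
  funext d c
  by_cases h : d.contains c
  · simp [h]
  · simp only [Bool.not_eq_true] at h
    rw [PySem.Dict.getD_of_not_contains d 0 h]
    simp [h]

-- A's collection loop over a nodup list of keys appends exactly the qualifying images
lemma foldl_add_filter (k : Int) (cnt : Char → Int) :
    ∀ (s : List Char) (w : PySem.Set String), s.Nodup → (∀ c ∈ s, String.ofList [c] ∉ w) →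
      s.foldl (fun w c => if cnt c > k then PySem.Set.add w (String.ofList [c]) else w) w
        = w ++ (s.filter (fun c => decide (cnt c > k))).map (fun c => String.ofList [c]) := by
  intro s
  induction s with
  | nil => intro w _ _; simp
  | cons c t ih =>
    intro w hnd hfresh
    have hcnw : String.ofList [c] ∉ w := hfresh c (by simp)
    have hnd' := hnd.of_cons
    by_cases hp : cnt c > k
    · have hadd : PySem.Set.add w (String.ofList [c]) = w ++ [String.ofList [c]] :=
        PySem.Set.add_of_not_mem hcnw
      have hfresh' : ∀ c' ∈ t, String.ofList [c'] ∉ w ++ [String.ofList [c]] := by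
        intro c' hc'
        simp only [List.mem_append, List.mem_singleton]
        rintro (h | h)
        · exact hfresh c' (by simp [hc']) h
        · exact (List.nodup_cons.mp hnd).1 (mkOne_inj h ▸ hc')
      rw [List.foldl_cons, if_pos hp, hadd, ih _ hnd' hfresh']
      simp [hp]
    · have hfresh' : ∀ c' ∈ t, String.ofList [c'] ∉ w := fun c' hc' => hfresh c' (by simp [hc'])
      rw [List.foldl_cons, if_neg hp, ih _ hnd' hfresh']
      simp [hp]

-- dedup commutes with filter
lemma ofList_filter (p : Char → Bool) :
    ∀ t : List Char, PySem.Set.ofList (t.filter p) = (PySem.Set.ofList t).filter p := by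
  intro t
  induction t with
  | nil => rfl
  | cons x t ih =>
    have hdis : ∀ (s : PySem.Set Char) (y : Char),
        PySem.Set.discard s y = s.filter (fun z => z != y) := by
      intro s y; simp [PySem.Set.discard, bne]
    by_cases hx : p x
    · rw [List.filter_cons_of_pos hx, PySem.Set.ofList_cons, PySem.Set.ofList_cons, ih,
        hdis, hdis, List.filter_cons_of_pos hx, List.filter_filter, List.filter_filter]
      congr 1
      apply List.filter_congr
      intro y _
      simp [Bool.and_comm]
    · rw [List.filter_cons_of_neg hx, PySem.Set.ofList_cons, ih,
        List.filter_cons_of_neg hx, hdis, List.filter_filter]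
      apply List.filter_congr
      intro y _
      by_cases hy : p y
      · have : y ≠ x := fun h => hx (h ▸ hy)
        simp [hy, this]
      · simp [hy]

-- dedup of a cons: head, then dedup of the tail with the head stripped
lemma ofList_cons_strip (c : Char) (t : List Char) :
    PySem.Set.ofList (c :: t) = c :: PySem.Set.ofList (t.filter (fun x => x != c)) := by
  rw [PySem.Set.ofList_cons, ofList_filter]
  congr 1

-- B's partition loop computes the qualifying distinct characters of its argument
lemma goB_eq (k : Int) :
    ∀ (n : ℕ) (m : List Char) (w : PySem.Set String), m.length ≤ n →
      (∀ c ∈ m, String.ofList [c] ∉ w) →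
      wiecejNizGo k m w
        = w ++ ((PySem.Set.ofList m).filter (fun c => decide ((m.count c : Int) > k))).map
            (fun c => String.ofList [c]) := by
  intro n
  induction n with
  | zero =>
    intro m w hlen _
    have : m = [] := List.eq_nil_of_length_eq_zero (Nat.le_zero.mp hlen)
    subst this; simp [wiecejNizGo]
  | succ n ih =>
    intro m w hlen hfresh
    match m with
    | [] => simp [wiecejNizGo]
    | c :: t =>
      have hrest : (c :: t).filter (fun x => x != c) = t.filter (fun x => x != c) := by
        simp
      have hlen' : (t.filter (fun x => x != c)).length ≤ n :=
        le_trans (List.length_filter_le _ _) (Nat.lt_succ_iff.mp hlen)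
      -- count of c equals the length drop
      have hcount : ((c :: t).count c : Int)
          = ((c :: t).length : Int) - (((c :: t).filter (fun x => x != c)).length : Int) := by
        have h1 : (c :: t).length
            = (c :: t).count c + ((c :: t).filter (fun x => x != c)).length := by
          have := List.length_eq_countP_add_countP (fun x => x == c) (l := c :: t)
          simpa [List.count, List.countP_eq_length_filter, bne] using this
        omega
      -- counts of survivors are unchanged by stripping c
      have hcongr : ∀ c' ∈ PySem.Set.ofList (t.filter (fun x => x != c)),
          (decide (((t.filter (fun x => x != c)).count c' : Int) > k))
            = (decide (((c :: t).count c' : Int) > k)) := by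
        intro c' hc'
        have hne : c' ≠ c := by
          have := (PySem.Set.mem_ofList _ _).mp hc'
          have := List.of_mem_filter this
          simpa [bne] using this
        have : (t.filter (fun x => x != c)).count c' = (c :: t).count c' := by
          rw [List.count_cons_of_ne hne.symm, List.count_filter (by simpa [bne] using hne)]
        rw [this]
      by_cases hq : ((c :: t).length : Int) - (((c :: t).filter (fun x => x != c)).length : Int) > k
      · have hcnw : String.ofList [c] ∉ w := hfresh c (by simp)
        have hadd : PySem.Set.add w (String.ofList [c]) = w ++ [String.ofList [c]] :=
          PySem.Set.add_of_not_mem hcnw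
        have hfresh' : ∀ c' ∈ t.filter (fun x => x != c),
            String.ofList [c'] ∉ w ++ [String.ofList [c]] := by
          intro c' hc'
          have hmem : c' ∈ t := List.mem_of_mem_filter hc'
          have hne : c' ≠ c := by simpa [bne] using List.of_mem_filter hc'
          simp only [List.mem_append, List.mem_singleton]
          rintro (h | h)
          · exact hfresh c' (by simp [hmem]) h
          · exact hne (mkOne_inj h)
        rw [wiecejNizGo, hrest]
        rw [if_pos (by rw [hrest] at hq; simpa [hrest] using hq)]
        rw [hadd, ih _ _ hlen' hfresh']
        rw [ofList_cons_strip, List.filter_cons_of_pos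
          (by rw [hcount]; exact decide_eq_true hq)]
        rw [List.filter_congr hcongr]
        simp
      · have hfresh' : ∀ c' ∈ t.filter (fun x => x != c), String.ofList [c'] ∉ w :=
          fun c' hc' => hfresh c' (by simp [List.mem_of_mem_filter hc'])
        rw [wiecejNizGo, hrest]
        rw [if_neg (by rw [hrest] at hq; simpa [hrest] using hq)]
        rw [ih _ _ hlen' hfresh']
        rw [ofList_cons_strip, List.filter_cons_of_neg
          (by simp only [decide_eq_true_eq]; rw [hcount]; exact hq)]
        rw [List.filter_congr hcongr]

-- ===== VERDICT (by name: the statement is the Claim_ definition above) =====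
theorem wiecej_niz_spec : Claim_equal_wiecej_niz := by
  intro napis ile_znakow _
  show wiecej_niz napis ile_znakow = wiecej_niz_alt napis ile_znakow
  simp only [wiecej_niz, wiecej_niz_alt]
  set l := (PySem.Str.lower napis).toList with hl
  rw [dictA_eq_counter l, PySem.Dict.items_counter, List.foldl_map]
  rw [show (fun (x : PySem.Set String) (y : Char) =>
        if (y, (l.count y : Int)).2 > ile_znakow then PySem.Set.add x (String.ofList [(y, (l.count y : Int)).1]) else x)
      = (fun (x : PySem.Set String) (y : Char) =>
        if (l.count y : Int) > ile_znakow then PySem.Set.add x (String.ofList [y]) else x) from rfl]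
  rw [foldl_add_filter ile_znakow (fun c => (l.count c : Int)) (PySem.Set.ofList l)
        PySem.Set.empty (PySem.Set.nodup_ofList l) (by intro c _; simp [PySem.Set.empty])]
  rw [goB_eq ile_znakow l.length l PySem.Set.empty le_rfl (by intro c _; simp [PySem.Set.empty])]
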